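-- pv_equiv track=rewrite | github.com/xaynetwork/xaynet | xain/generator/config.py | dist_to_indicies
-- ===== SOURCE A (Python) =====
-- from typing import List
--
-- def dist_to_indicies(dist: List[int]) -> List[int]:
--     indices = [0] * len(dist)
--     for i, _ in enumerate(dist):
--         if i == 0:
--             indices[i] = dist[i]
--         else:
--             indices[i] = indices[i - 1] + dist[i]
--
--     assert indices[-1] == sum(dist)
--
--     # Exclude last element as indices only mark start of section
--     return indices[:-1]
-- ===== SOURCE B (Python) =====
-- from typing import List
--
-- def dist_to_indicies(dist: List[int]) -> List[int]:
--     # Walk the list backwards, peeling each element off the running total: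
--     # after subtracting dist[j], acc is the sum of dist[:j].
--     acc = sum(dist)
--     out = []
--     for x in reversed(dist):
--         acc -= x
--         out.append(acc)
--     out.pop()  # acc reached 0 = sum of dist[:0], which is not a section start we report
--     out.reverse()
--     return out
-- ===== Notes on version B (the rewrite author's own statement) =====
-- stated objective: alternative
-- what changed: Replaces the left-to-right in-place prefix-sum accumulation by a backwards traversal that peels each element off the precomputed total, building the result back-to-front and reversing it.
import Mathlib
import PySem

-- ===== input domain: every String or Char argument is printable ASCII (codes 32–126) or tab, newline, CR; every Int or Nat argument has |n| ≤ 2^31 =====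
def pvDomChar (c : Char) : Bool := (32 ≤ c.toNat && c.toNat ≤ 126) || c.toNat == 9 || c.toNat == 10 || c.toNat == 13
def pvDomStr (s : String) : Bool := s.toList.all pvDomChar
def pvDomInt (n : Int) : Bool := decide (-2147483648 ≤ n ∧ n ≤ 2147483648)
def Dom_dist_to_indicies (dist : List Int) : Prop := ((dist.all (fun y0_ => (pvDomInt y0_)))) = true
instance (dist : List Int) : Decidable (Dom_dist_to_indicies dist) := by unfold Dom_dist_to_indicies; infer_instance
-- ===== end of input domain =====

-- B replaces A's left-to-right in-place prefix-sum accumulation by a backwards traversal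
-- peeling each element off the precomputed total, building the result back-to-front; no speed claim.

-- ===== PORT A =====
def dist_to_indicies (dist : List Int) : List Int :=
  let indices0 : List Int := List.replicate dist.length 0
  let indices :=
    (PySem.List.enumerate dist).foldl
      (fun ind p =>
        if p.1 = 0 then
          PySem.List.pySetD ind p.1 (PySem.List.pyGetD dist p.1 0)
        else
          PySem.List.pySetD ind p.1
            (PySem.List.pyGetD ind (p.1 - 1) 0 + PySem.List.pyGetD dist p.1 0))
      indices0
  -- assert indices[-1] == sum(dist): passes on every nonempty list (Pre_), raises on []
  PySem.List.slice indices none (some (-1))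

-- ===== PORT B =====
def dist_to_indicies_alt (dist : List Int) : List Int :=
  let p := dist.reverse.foldl
    (fun (s : Int × List Int) x => (s.1 - x, s.2 ++ [s.1 - x])) (dist.sum, ([] : List Int))
  -- out.pop(): drops the last element; raises IndexError on the empty list (outside Pre_)
  let out := p.2.dropLast
  out.reverse

-- ===== PRECONDITION & SPEC =====
-- A (and B) raise IndexError on the empty list at indices[-1]; Pre_ excludes exactly that input.
def Pre_dist_to_indicies (dist : List Int) : Prop := dist ≠ []
instance (dist : List Int) : Decidable (Pre_dist_to_indicies dist) := by
  unfold Pre_dist_to_indicies; infer_instance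
def pvWitness_dist_to_indicies : List Int := ([1, 2, 3] : List Int)

def Spec_dist_to_indicies (dist : List Int) (out : List Int) : Prop := out = dist_to_indicies_alt dist
instance (dist : List Int) (out : List Int) : Decidable (Spec_dist_to_indicies dist out) := by unfold Spec_dist_to_indicies; infer_instance

-- ===== CLAIM (what is proved, stated in full; the proofs are below) =====
def Claim_equal_dist_to_indicies : Prop := ∀ (dist : List Int), Dom_dist_to_indicies dist → Pre_dist_to_indicies dist → Spec_dist_to_indicies dist (dist_to_indicies dist)

-- ===== LEMMAS AND PROOFS =====

-- prefix sum of dist up to and including index i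
def pvS (dist : List Int) (i : Nat) : Int := (dist.take (i + 1)).sum

-- state of A's indices list after the first k loop iterations
def pvPart (dist : List Int) (k : Nat) : List Int :=
  (List.range dist.length).map (fun i => if i < k then pvS dist i else 0)

lemma pvS_succ (dist : List Int) (m : Nat) (hk : m + 1 < dist.length) :
    pvS dist (m + 1) = pvS dist m + dist.getD (m + 1) 0 := by
  simp only [pvS]
  rw [List.take_add_one, List.sum_append]
  have h : dist[m + 1]? = some dist[m + 1] := List.getElem?_eq_getElem hk
  simp [h, List.getD_eq_getElem?_getD]

lemma pvPart_set (dist : List Int) (k : Nat) (_hk : k < dist.length) :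
    (pvPart dist k).set k (pvS dist k) = pvPart dist (k + 1) := by
  apply List.ext_getElem
  · simp [pvPart]
  · intro i h1 h2
    simp only [pvPart, List.length_map, List.length_range] at h1 h2 ⊢
    rw [List.getElem_set]
    simp only [List.getElem_map, List.getElem_range]
    split_ifs with h3 h4 h5 h6 h7 <;> first | rfl | (exfalso; omega) | (subst h3; rfl)

lemma pvGetD_pvPart (dist : List Int) (k j : Nat) (hj : j < k) (hk : k ≤ dist.length) :
    (pvPart dist k).getD j 0 = pvS dist j := by
  have hjl : j < dist.length := lt_of_lt_of_le hj hk
  rw [pvPart, List.getD_eq_getElem?_getD]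
  rw [List.getElem?_eq_getElem (by simpa using hjl)]
  simp [hj]

-- A's loop body, after rewriting enumerate to a pyRange map
def pvStep (dist : List Int) (ind : List Int) (j : Int) : List Int :=
  if j = 0 then PySem.List.pySetD ind j (PySem.List.pyGetD dist j 0)
  else PySem.List.pySetD ind j (PySem.List.pyGetD ind (j - 1) 0 + PySem.List.pyGetD dist j 0)

lemma pvLoop (dist : List Int) (k : Nat) (hk : k ≤ dist.length) :
    (PySem.List.pyRange 0 (k : Int) 1).foldl (pvStep dist) (pvPart dist 0) = pvPart dist k := by
  induction k with
  | zero => simp [PySem.List.pyRange_one_eq_nil]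
  | succ m ih =>
    have hm : m ≤ dist.length := Nat.le_of_succ_le hk
    have hml : m < dist.length := hk
    have : ((m + 1 : Nat) : Int) = (m : Int) + 1 := by push_cast; ring
    rw [this, PySem.List.pyRange_one_succ_right (by positivity), List.foldl_append, ih hm]
    simp only [List.foldl_cons, List.foldl_nil]
    -- one step at index m
    cases m with
    | zero =>
      have hstep : pvStep dist (pvPart dist 0) ((0 : Nat) : Int) =
          (pvPart dist 0).set 0 (pvS dist 0) := by
        simp only [pvStep]
        rw [if_pos (by norm_num), PySem.List.pySetD_natCast, PySem.List.pyGetD_natCast]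
        rw [show dist.getD 0 0 = pvS dist 0 by
          cases dist with
          | nil => simp at hml
          | cons a l => simp [pvS]]
      rw [hstep]
      exact pvPart_set dist 0 hml
    | succ p =>
      have hne : ((p + 1 : Nat) : Int) ≠ 0 := by positivity
      simp only [pvStep, if_neg hne]
      have h1 : ((p + 1 : Nat) : Int) - 1 = ((p : Nat) : Int) := by push_cast; ring
      rw [h1, PySem.List.pySetD_natCast, PySem.List.pyGetD_natCast, PySem.List.pyGetD_natCast]
      rw [pvGetD_pvPart dist (p + 1) p (by omega) hm]
      rw [show pvS dist p + dist.getD (p + 1) 0 = pvS dist (p + 1) by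
        rw [pvS_succ dist p hml]]
      exact pvPart_set dist (p + 1) hml

lemma pvA_indices (dist : List Int) :
    (PySem.List.enumerate dist).foldl
      (fun ind p =>
        if p.1 = 0 then
          PySem.List.pySetD ind p.1 (PySem.List.pyGetD dist p.1 0)
        else
          PySem.List.pySetD ind p.1
            (PySem.List.pyGetD ind (p.1 - 1) 0 + PySem.List.pyGetD dist p.1 0))
      (List.replicate dist.length 0) = pvPart dist dist.length := by
  rw [PySem.List.enumerate_eq_map_pyRange (d := 0), List.foldl_map, PySem.List.len_eq]
  have h0 : List.replicate dist.length (0 : Int) = pvPart dist 0 := by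
    simp [pvPart, List.map_const']
  rw [h0, ← pvLoop dist dist.length le_rfl]
  exact PySem.List.foldl_congr_mem _ _ _ _ (fun acc x _ => rfl)

lemma pvBfold (l : List Int) (a : Int) (o : List Int) :
    l.foldl (fun (s : Int × List Int) x => (s.1 - x, s.2 ++ [s.1 - x])) (a, o) =
      (a - l.sum, o ++ (List.range l.length).map (fun k => a - (l.take (k + 1)).sum)) := by
  induction l generalizing a o with
  | nil => simp
  | cons x t ih =>
    simp only [List.foldl_cons, ih, List.length_cons, List.range_succ_eq_map, List.map_cons,
      List.map_map, List.sum_cons]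
    refine Prod.ext (by dsimp; ring) ?_
    simp only [List.take_succ_cons, List.sum_cons, List.take_zero, List.sum_nil,
      List.append_assoc, List.singleton_append]
    congr 1
    refine congrArg₂ List.cons (by ring) ?_
    apply List.map_congr_left
    intro k _
    simp only [Function.comp_apply, Nat.succ_eq_add_one]
    ring

lemma pvB_eq (dist : List Int) :
    dist_to_indicies_alt dist =
      (((List.range dist.length).map
          (fun k => dist.sum - (dist.reverse.take (k + 1)).sum)).dropLast).reverse := by
  simp only [dist_to_indicies_alt, pvBfold, List.nil_append, List.length_reverse]

-- ===== VERDICT (by name: the statement is the Claim_ definition above) =====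
theorem dist_to_indicies_spec : Claim_equal_dist_to_indicies := by
  intro dist _ _
  unfold Spec_dist_to_indicies dist_to_indicies
  simp only [pvA_indices, pvB_eq, PySem.List.slice_to_neg_one]
  apply List.ext_getElem
  · simp [pvPart]
  · intro i h1 h2
    simp only [pvPart, List.getElem_reverse, List.getElem_dropLast, List.getElem_map,
      List.getElem_range] at h1 h2 ⊢
    simp only [List.length_dropLast, List.length_map, List.length_range] at h1 h2 ⊢
    rw [if_pos (by omega)]
    rw [show dist.length - 1 - 1 - i + 1 = dist.length - 1 - i by omega]
    rw [List.take_reverse, List.sum_reverse]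
    rw [show dist.length - (dist.length - 1 - i) = i + 1 by omega]
    have := List.sum_take_add_sum_drop dist (i + 1)
    simp only [pvS]
    omega
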